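-- pv_equiv track=rewrite | github.com/XiaohanChai/Crown-Generation | tools/merge_2_obj_to_1_shift.py | adjust_face_token
-- ===== SOURCE A (Python) =====
-- def adjust_index(idx_str, offset, base_count):
--     if idx_str == '' or idx_str is None:
--         return ''
--     try:
--         idx = int(idx_str)
--     except ValueError:
--         return idx_str
--     if idx > 0:
--         abs_idx = idx
--     else:
--         abs_idx = base_count + 1 + idx
--     new_idx = offset + abs_idx
--     return str(new_idx)
--
-- def adjust_face_token(token, v_offset, vt_offset, vn_offset, base_counts):
--     parts = token.split('/')
--     while len(parts) < 3:
--         parts.append('')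
--     v_part, vt_part, vn_part = parts[0], parts[1], parts[2]
--     v_new = adjust_index(v_part, v_offset, base_counts['v']) if v_part != '' else ''
--     vt_new = adjust_index(vt_part, vt_offset, base_counts['vt']) if vt_part != '' else ''
--     vn_new = adjust_index(vn_part, vn_offset, base_counts['vn']) if vn_part != '' else ''
--     if vt_part == '' and vn_part != '':
--         return f"{v_new}//{vn_new}"
--     if vt_part != '' and vn_part == '':
--         return f"{v_new}/{vt_new}"
--     if vt_part == '' and vn_part == '':
--         return f"{v_new}"
--     return f"{v_new}/{vt_new}/{vn_new}"
-- ===== SOURCE B (Python) =====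
-- def adjust_index(idx_str, offset, base_count):
--     if idx_str == '' or idx_str is None:
--         return ''
--     try:
--         idx = int(idx_str)
--     except ValueError:
--         return idx_str
--     if idx > 0:
--         abs_idx = idx
--     else:
--         abs_idx = base_count + 1 + idx
--     new_idx = offset + abs_idx
--     return str(new_idx)
--
-- def adjust_face_token(token, v_offset, vt_offset, vn_offset, base_counts):
--     # Build the result back-to-front: recurse over at most the first three fields;
--     # a '/' separator is emitted exactly when the already-built tail is nonempty,
--     # so trailing empty fields vanish with no padding, no strip, no format branches.
--     fields = token.split('/')[:3]
--     specs = ((v_offset, 'v'), (vt_offset, 'vt'), (vn_offset, 'vn'))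
--     def go(i):
--         if i == len(fields):
--             return ''
--         off, key = specs[i]
--         head = adjust_index(fields[i], off, base_counts[key]) if fields[i] != '' else ''
--         tail = go(i + 1)
--         return head if tail == '' else head + '/' + tail
--     return go(0)
-- ===== Notes on version B (the rewrite author's own statement) =====
-- stated objective: simpler
-- what changed: B drops A's while-append padding and four explicit format branches: it truncates the split to three fields and builds the result back-to-front by recursion, emitting a '/' separator only when the already-built tail is nonempty, so trailing empty fields disappear without padding or case analysis.
import Mathlib
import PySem

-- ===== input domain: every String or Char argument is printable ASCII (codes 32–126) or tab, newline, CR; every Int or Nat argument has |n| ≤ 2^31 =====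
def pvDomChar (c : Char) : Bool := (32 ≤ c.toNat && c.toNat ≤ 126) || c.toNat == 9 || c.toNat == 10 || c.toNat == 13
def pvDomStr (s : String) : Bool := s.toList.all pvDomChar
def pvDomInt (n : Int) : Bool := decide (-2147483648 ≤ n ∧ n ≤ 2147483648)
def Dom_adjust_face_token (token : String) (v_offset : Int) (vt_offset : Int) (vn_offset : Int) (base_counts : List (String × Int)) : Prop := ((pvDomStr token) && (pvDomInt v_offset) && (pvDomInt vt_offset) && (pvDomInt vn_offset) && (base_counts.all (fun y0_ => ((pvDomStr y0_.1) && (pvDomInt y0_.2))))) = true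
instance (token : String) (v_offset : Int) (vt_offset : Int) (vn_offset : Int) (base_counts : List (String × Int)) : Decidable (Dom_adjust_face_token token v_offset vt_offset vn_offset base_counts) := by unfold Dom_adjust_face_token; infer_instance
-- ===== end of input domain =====

-- B replaces A's while-append padding and four explicit format branches by a back-to-front
-- recursive build over at most the first three fields, emitting '/' only before a nonempty
-- tail; objective: simpler.

-- ===== PORT A =====

-- dict lookup base_counts[k]: first match in the association list; none = KeyError (excluded by Pre_)
def pvLookup (d : List (String × Int)) (k : String) : Option Int :=
  (d.find? (fun p => p.1 == k)).map (·.2)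

def adjust_index (idx_str : String) (offset : Int) (base_count : Int) : String :=
  -- 'idx_str is None' is unreachable under the type convention (idx_str : String)
  if idx_str = "" then ""
  else
    match PySem.Int.ofStr? idx_str with
    | none => idx_str                     -- except ValueError: return idx_str
    | some idx =>
      let abs_idx := if idx > 0 then idx else base_count + 1 + idx
      PySem.Int.toStr (offset + abs_idx)

-- 'while len(parts) < 3: parts.append('')' — the loop runs at most 3 times, fuel 3 makes it structural
def pvPadWhile : Nat → List String → List String
  | 0, parts => parts
  | f + 1, parts => if parts.length < 3 then pvPadWhile f (parts ++ [""]) else parts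

def adjust_face_token (token : String) (v_offset : Int) (vt_offset : Int) (vn_offset : Int) (base_counts : List (String × Int)) : String :=
  let parts := pvPadWhile 3 ((PySem.Str.split? token "/").getD [])
  let v_part := parts.getD 0 ""          -- length ≥ 3 after the pad loop, so getD is exact
  let vt_part := parts.getD 1 ""
  let vn_part := parts.getD 2 ""
  -- base_counts['v'] etc.: KeyError (pvLookup = none) is excluded by Pre_; the default is never claimed
  let v_new := if v_part ≠ "" then adjust_index v_part v_offset ((pvLookup base_counts "v").getD 0) else ""
  let vt_new := if vt_part ≠ "" then adjust_index vt_part vt_offset ((pvLookup base_counts "vt").getD 0) else ""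
  let vn_new := if vn_part ≠ "" then adjust_index vn_part vn_offset ((pvLookup base_counts "vn").getD 0) else ""
  if vt_part = "" ∧ vn_part ≠ "" then v_new ++ "//" ++ vn_new
  else if vt_part ≠ "" ∧ vn_part = "" then v_new ++ "/" ++ vt_new
  else if vt_part = "" ∧ vn_part = "" then v_new
  else v_new ++ "/" ++ vt_new ++ "/" ++ vn_new

-- ===== PORT B =====

-- B keeps adjust_index unchanged (its own copy)
def adjust_index_alt (idx_str : String) (offset : Int) (base_count : Int) : String :=
  if idx_str = "" then ""
  else
    match PySem.Int.ofStr? idx_str with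
    | none => idx_str
    | some idx =>
      let abs_idx := if idx > 0 then idx else base_count + 1 + idx
      PySem.Int.toStr (offset + abs_idx)

-- Source B's inner 'go(i)': recursion over the remaining (field, offset, key) triples,
-- building the result back-to-front; '/' is emitted only before a nonempty tail
def pvGo (base_counts : List (String × Int)) : List (String × Int × String) → String
  | [] => ""
  | (p, off, key) :: rest =>
      let head := if p ≠ "" then adjust_index_alt p off ((pvLookup base_counts key).getD 0) else ""
      let tail := pvGo base_counts rest
      if tail = "" then head else head ++ "/" ++ tail

def adjust_face_token_alt (token : String) (v_offset : Int) (vt_offset : Int) (vn_offset : Int) (base_counts : List (String × Int)) : String :=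
  let fields := ((PySem.Str.split? token "/").getD []).take 3
  -- go(i) walks fields[i] with specs[i]; zip with the three specs realises the same pairing
  pvGo base_counts (fields.zip [(v_offset, "v"), (vt_offset, "vt"), (vn_offset, "vn")])

-- ===== PRECONDITION & SPEC =====
-- Pre_ excludes exactly the KeyError inputs: whenever one of the first three '/'-fields of token is
-- nonempty, the corresponding key 'v'/'vt'/'vn' must be present in base_counts (else Python A raises).
def Pre_adjust_face_token (token : String) (v_offset : Int) (vt_offset : Int) (vn_offset : Int) (base_counts : List (String × Int)) : Prop :=
  (((PySem.Str.split? token "/").getD []).getD 0 "" ≠ "" → (pvLookup base_counts "v").isSome = true) ∧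
  (((PySem.Str.split? token "/").getD []).getD 1 "" ≠ "" → (pvLookup base_counts "vt").isSome = true) ∧
  (((PySem.Str.split? token "/").getD []).getD 2 "" ≠ "" → (pvLookup base_counts "vn").isSome = true)
instance (token : String) (v_offset : Int) (vt_offset : Int) (vn_offset : Int) (base_counts : List (String × Int)) : Decidable (Pre_adjust_face_token token v_offset vt_offset vn_offset base_counts) := by unfold Pre_adjust_face_token; infer_instance

def pvWitness_adjust_face_token : String × Int × Int × Int × (List (String × Int)) :=
  ("5/-1/2", 100, 20, 30, [("v", 10), ("vt", 4), ("vn", 6)])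

def Spec_adjust_face_token (token : String) (v_offset : Int) (vt_offset : Int) (vn_offset : Int) (base_counts : List (String × Int)) (out : String) : Prop := out = adjust_face_token_alt token v_offset vt_offset vn_offset base_counts
instance (token : String) (v_offset : Int) (vt_offset : Int) (vn_offset : Int) (base_counts : List (String × Int)) (out : String) : Decidable (Spec_adjust_face_token token v_offset vt_offset vn_offset base_counts out) := by unfold Spec_adjust_face_token; infer_instance

-- ===== CLAIM (what is proved, stated in full; the proofs are below) =====
def Claim_equal_adjust_face_token : Prop := ∀ (token : String) (v_offset : Int) (vt_offset : Int) (vn_offset : Int) (base_counts : List (String × Int)), Dom_adjust_face_token token v_offset vt_offset vn_offset base_counts → Pre_adjust_face_token token v_offset vt_offset vn_offset base_counts → Spec_adjust_face_token token v_offset vt_offset vn_offset base_counts (adjust_face_token token v_offset vt_offset vn_offset base_counts)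

-- ===== LEMMAS AND PROOFS =====

-- str(n) is never the empty string
theorem toDigitsCore_length_le (b : Nat) : ∀ (f n : Nat) (l : List Char),
    l.length ≤ (Nat.toDigitsCore b f n l).length := by
  intro f
  induction f with
  | zero => intro n l; simp [Nat.toDigitsCore]
  | succ f ih =>
      intro n l
      simp only [Nat.toDigitsCore]
      split
      · simp
      · exact le_trans (by simp) (ih _ _)

theorem toDigitsCore_succ_ne (b f n : Nat) (l : List Char) :
    Nat.toDigitsCore b (f + 1) n l ≠ [] := by
  simp only [Nat.toDigitsCore]
  split
  · simp
  · intro h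
    have := toDigitsCore_length_le b f (n / b) ((n % b).digitChar :: l)
    rw [h] at this
    simp at this

theorem toStr_ne_empty (n : Int) : PySem.Int.toStr n ≠ "" := by
  intro h
  have h' : (PySem.Int.toStr n).toList = ("" : String).toList := by rw [h]
  rw [PySem.Int.toList_toStr] at h'
  unfold PySem.Int.toChars Nat.toDigits at h'
  split at h'
  · simp at h'
  · exact toDigitsCore_succ_ne 10 n.toNat n.toNat [] (by simpa using h')

theorem adjust_index_ne_empty (s : String) (o k : Int) (hs : s ≠ "") :
    adjust_index s o k ≠ "" := by
  unfold adjust_index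
  rw [if_neg hs]
  cases PySem.Int.ofStr? s with
  | none => simpa using hs
  | some idx => simpa using toStr_ne_empty _

theorem adjust_index_alt_eq : adjust_index_alt = adjust_index := rfl

theorem newpart_empty_iff (p : String) (o k : Int) :
    ((if p ≠ "" then adjust_index p o k else "") = "") ↔ p = "" := by
  by_cases hp : p = ""
  · simp [hp]
  · simp [hp, adjust_index_ne_empty p o k hp]

theorem append_slash_ne (x y : String) : x ++ "/" ++ y ≠ "" := by
  intro h
  have := congrArg String.toList h
  simp at this

-- B's recursion on one, two or three triples, reduced to A's four-branch shape
theorem pad3 (a b c : String) (r : List String) :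
    pvPadWhile 3 (a :: b :: c :: r) = a :: b :: c :: r := by
  simp only [pvPadWhile, List.length_cons]
  rw [if_neg (by omega)]

-- the core bridge: A's four format branches = B's back-to-front recursion on three triples
theorem bridge (pa pb pc : String) (v_offset vt_offset vn_offset : Int)
    (base_counts : List (String × Int)) :
    (if pb = "" ∧ pc ≠ "" then
        (if pa ≠ "" then adjust_index pa v_offset ((pvLookup base_counts "v").getD 0) else "") ++ "//" ++
          (if pc ≠ "" then adjust_index pc vn_offset ((pvLookup base_counts "vn").getD 0) else "")
      else if pb ≠ "" ∧ pc = "" then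
        (if pa ≠ "" then adjust_index pa v_offset ((pvLookup base_counts "v").getD 0) else "") ++ "/" ++
          (if pb ≠ "" then adjust_index pb vt_offset ((pvLookup base_counts "vt").getD 0) else "")
      else if pb = "" ∧ pc = "" then
        (if pa ≠ "" then adjust_index pa v_offset ((pvLookup base_counts "v").getD 0) else "")
      else
        (if pa ≠ "" then adjust_index pa v_offset ((pvLookup base_counts "v").getD 0) else "") ++ "/" ++
          (if pb ≠ "" then adjust_index pb vt_offset ((pvLookup base_counts "vt").getD 0) else "") ++ "/" ++
          (if pc ≠ "" then adjust_index pc vn_offset ((pvLookup base_counts "vn").getD 0) else "")) =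
    pvGo base_counts [(pa, v_offset, "v"), (pb, vt_offset, "vt"), (pc, vn_offset, "vn")] := by
  simp only [pvGo, adjust_index_alt_eq]
  set x := if pa ≠ "" then adjust_index pa v_offset ((pvLookup base_counts "v").getD 0) else ""
  set y := if pb ≠ "" then adjust_index pb vt_offset ((pvLookup base_counts "vt").getD 0) else ""
  set z := if pc ≠ "" then adjust_index pc vn_offset ((pvLookup base_counts "vn").getD 0) else ""
  have hy : y = "" ↔ pb = "" := newpart_empty_iff pb vt_offset _
  have hz : z = "" ↔ pc = "" := newpart_empty_iff pc vn_offset _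
  by_cases hb : pb = "" <;> by_cases hc : pc = ""
  · simp [hb, hc, hy.mpr hb, hz.mpr hc]
  · have hz' : z ≠ "" := fun h => hc (hz.mp h)
    simp only [hb, hc, hy.mpr hb, hz', ne_eq, not_true_eq_false, not_false_eq_true,
      and_true, and_false, if_true, if_false, if_neg (append_slash_ne "" z)]
    rw [← String.toList_inj]; simp
  · have hy' : y ≠ "" := fun h => hb (hy.mp h)
    simp [hb, hc, hz.mpr hc, hy']
  · have hy' : y ≠ "" := fun h => hb (hy.mp h)
    have hz' : z ≠ "" := fun h => hc (hz.mp h)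
    simp only [hb, hc, hz', ne_eq, not_false_eq_true, and_self, and_false, if_true,
      if_false, if_neg (append_slash_ne y z)]
    rw [← String.toList_inj]; simp

-- ===== VERDICT (by name: the statement is the Claim_ definition above) =====
theorem adjust_face_token_spec : Claim_equal_adjust_face_token := by
  intro token v_offset vt_offset vn_offset base_counts _ _
  unfold Spec_adjust_face_token adjust_face_token adjust_face_token_alt
  generalize (PySem.Str.split? token "/").getD [] = L
  rcases L with _ | ⟨a, _ | ⟨b, _ | ⟨c, rest⟩⟩⟩
  · rfl
  · exact bridge a "" "" v_offset vt_offset vn_offset base_counts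
  · exact bridge a b "" v_offset vt_offset vn_offset base_counts
  · rw [pad3]
    exact bridge a b c v_offset vt_offset vn_offset base_counts
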